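-- pv_equiv track=rewrite | github.com/asapdiscovery/asapdiscovery | asapdiscovery-alchemy/asapdiscovery/alchemy/cli/utils.py | report_alchemize_clusters
-- ===== SOURCE A (Python) =====
-- def report_alchemize_clusters(alchemical_clusters, outsiders):
--     """does some reporting alchemical cluster and outsider composition for asap-alchemy.prep.alchemize().
--     Returns dicts that report {number-of-compounds-in-cluster : number-of-clusters-of-this-size, ..} for
--     both alchemical clusters and outsider clusters. Also returns the total number of compounds in
--     alchemical clusters."""
--     from collections import Counter
--
--     alchemical_cluster_sizes = dict(
--         Counter([len(v) for _, v in alchemical_clusters.items()])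
--     )
--     outsider_cluster_sizes = dict(Counter([len(v) for _, v in outsiders.items()]))
--
--     # sort the dicts for easier interpretation of reports
--     alchemical_cluster_sizes = dict(
--         sorted(alchemical_cluster_sizes.items(), reverse=True)
--     )
--     outsider_cluster_sizes = dict(sorted(outsider_cluster_sizes.items(), reverse=True))
--
--     alchemical_num_in_clusters = sum(
--         [
--             cluster_size * num_clusters
--             for cluster_size, num_clusters in alchemical_cluster_sizes.items()
--         ]
--     )
--     return alchemical_cluster_sizes, outsider_cluster_sizes, alchemical_num_in_clusters
-- ===== SOURCE B (Python) =====
-- def report_alchemize_clusters(alchemical_clusters, outsiders):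
--     """Same report via sort-then-group: sort all cluster sizes descending and
--     run-length encode the sorted sequence in one walk, instead of hash-counting
--     with Counter and then sorting the histogram's items."""
--
--     def size_distribution(clusters):
--         sizes = sorted((len(v) for v in clusters.values()), reverse=True)
--         dist = {}
--         run_size, run_count = None, 0
--         for s in sizes:
--             if s == run_size:
--                 run_count += 1
--             else:
--                 if run_count:
--                     dist[run_size] = run_count
--                 run_size, run_count = s, 1
--         if run_count:
--             dist[run_size] = run_count
--         return dist
--
--     total = sum(len(v) for v in alchemical_clusters.values())
--     return size_distribution(alchemical_clusters), size_distribution(outsiders), total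
-- ===== Notes on version B (the rewrite author's own statement) =====
-- stated objective: alternative
-- what changed: Replaces Counter hash-counting followed by an items key-sort with sorting the full multiset of cluster sizes descending and run-length encoding the sorted sequence in a single forward walk; the total is summed directly from the cluster values instead of from the histogram.
import Mathlib
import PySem

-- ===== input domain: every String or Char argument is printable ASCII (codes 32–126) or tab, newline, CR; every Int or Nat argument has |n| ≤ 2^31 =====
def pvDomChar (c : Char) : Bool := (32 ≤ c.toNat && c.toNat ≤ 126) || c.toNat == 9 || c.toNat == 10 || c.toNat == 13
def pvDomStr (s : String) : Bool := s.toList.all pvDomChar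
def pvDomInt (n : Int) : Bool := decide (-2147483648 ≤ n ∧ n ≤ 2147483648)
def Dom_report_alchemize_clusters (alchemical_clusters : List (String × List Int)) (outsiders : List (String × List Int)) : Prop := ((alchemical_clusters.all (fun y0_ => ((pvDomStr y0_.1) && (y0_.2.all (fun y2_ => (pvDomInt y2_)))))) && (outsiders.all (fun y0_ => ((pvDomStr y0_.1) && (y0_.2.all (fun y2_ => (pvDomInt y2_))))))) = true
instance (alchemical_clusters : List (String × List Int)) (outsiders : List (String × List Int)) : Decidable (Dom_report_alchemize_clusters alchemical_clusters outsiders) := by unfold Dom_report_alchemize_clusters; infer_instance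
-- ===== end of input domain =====

-- B replaces A's Counter-then-items-sort histogram by sorting the full multiset of
-- cluster sizes descending and run-length encoding the sorted sequence in one walk,
-- summing the total from the cluster values; objective: alternative (sort-then-group).


-- ===== PORT A =====
-- [len(v) for _, v in d.items()]  (the dict argument is modelled as Dict.ofList of the assoc list)
def pvLensA (d : List (String × List Int)) : List Int :=
  ((PySem.Dict.ofList d).items).map (fun p => (p.2.length : Int))

def report_alchemize_clusters (alchemical_clusters : List (String × List Int)) (outsiders : List (String × List Int)) : (List (Int × Int)) × (List (Int × Int)) × Int :=
  -- alchemical_cluster_sizes = dict(Counter([len(v) for _, v in alchemical_clusters.items()]))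
  let alchemical_cluster_sizes := PySem.Dict.counter (pvLensA alchemical_clusters)
  -- outsider_cluster_sizes = dict(Counter([len(v) for _, v in outsiders.items()]))
  let outsider_cluster_sizes := PySem.Dict.counter (pvLensA outsiders)
  -- ... = dict(sorted(....items(), reverse=True))   (tuple comparison: sorted2)
  let alchemical_sorted := PySem.List.sorted2 alchemical_cluster_sizes.items (fun p => p.1) (fun p => p.2) true
  let outsider_sorted := PySem.List.sorted2 outsider_cluster_sizes.items (fun p => p.1) (fun p => p.2) true
  -- alchemical_num_in_clusters = sum([size * num for size, num in ....items()])
  let alchemical_num_in_clusters := (alchemical_sorted.map (fun p => p.1 * p.2)).sum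
  (alchemical_sorted, outsider_sorted, alchemical_num_in_clusters)

-- ===== PORT B =====
-- the run-length loop of Source B with an open run (run_size, run_count): extend the run
-- while the value repeats, emit the finished run when it changes, emit the open run at the end
def pvRleGo (run cnt : Int) : List Int → List (Int × Int)
  | [] => [(run, cnt)]
  | s :: rest => if s = run then pvRleGo run (cnt + 1) rest
                 else (run, cnt) :: pvRleGo s 1 rest

-- size_distribution: sizes = sorted((len(v) for v in clusters.values()), reverse=True), then
-- the loop above (on an empty input nothing is emitted; the first element starts the first run)
def pvSizeDist (clusters : List (String × List Int)) : List (Int × Int) :=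
  let sizes := PySem.List.sorted
    (((PySem.Dict.ofList clusters).values).map (fun v => (v.length : Int))) (fun k => k) true
  match sizes with
  | [] => []
  | s :: rest => pvRleGo s 1 rest

def report_alchemize_clusters_alt (alchemical_clusters : List (String × List Int)) (outsiders : List (String × List Int)) : (List (Int × Int)) × (List (Int × Int)) × Int :=
  -- total = sum(len(v) for v in alchemical_clusters.values())
  let total := ((((PySem.Dict.ofList alchemical_clusters).values).map (fun v => (v.length : Int)))).sum
  (pvSizeDist alchemical_clusters, pvSizeDist outsiders, total)

-- ===== PRECONDITION & SPEC =====
def Spec_report_alchemize_clusters (alchemical_clusters : List (String × List Int)) (outsiders : List (String × List Int)) (out : (List (Int × Int)) × (List (Int × Int)) × Int) : Prop := out = report_alchemize_clusters_alt alchemical_clusters outsiders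
instance (alchemical_clusters : List (String × List Int)) (outsiders : List (String × List Int)) (out : (List (Int × Int)) × (List (Int × Int)) × Int) : Decidable (Spec_report_alchemize_clusters alchemical_clusters outsiders out) := by unfold Spec_report_alchemize_clusters; infer_instance

-- ===== CLAIM (what is proved, stated in full; the proofs are below) =====
def Claim_equal_report_alchemize_clusters : Prop := ∀ (alchemical_clusters : List (String × List Int)) (outsiders : List (String × List Int)), Dom_report_alchemize_clusters alchemical_clusters outsiders → Spec_report_alchemize_clusters alchemical_clusters outsiders (report_alchemize_clusters alchemical_clusters outsiders)

-- ===== LEMMAS AND PROOFS =====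

-- the run-length loop, named for the proofs (pvSizeDist's match on the sorted sizes)
def pvRle : List Int → List (Int × Int)
  | [] => []
  | s :: rest => pvRleGo s 1 rest

-- insertBy only depends on the comparator's values at the inserted element vs. list members
theorem insertBy_congr {α : Type} (f g : α → α → Bool) (x : α) (ys : List α)
    (h : ∀ y ∈ ys, f x y = g x y) :
    PySem.List.insertBy f x ys = PySem.List.insertBy g x ys := by
  induction ys with
  | nil => rfl
  | cons y ys ih =>
      simp only [PySem.List.insertBy]
      rw [h y (by simp)]
      by_cases hg : g x y = true
      · simp [hg]
      · simp [hg, ih (fun z hz => h z (by simp [hz]))]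

-- insertion-sort folds agree when the comparators agree on all pairs drawn from the input
theorem foldl_insertBy_congr {α : Type} (f g : α → α → Bool) (xs acc : List α)
    (h : ∀ a ∈ xs ++ acc, ∀ b ∈ xs ++ acc, f a b = g a b) :
    xs.foldl (fun acc x => PySem.List.insertBy f x acc) acc
      = xs.foldl (fun acc x => PySem.List.insertBy g x acc) acc := by
  induction xs generalizing acc with
  | nil => rfl
  | cons x xs ih =>
      simp only [List.foldl_cons]
      rw [insertBy_congr f g x acc (fun y hy => h x (by simp) y (by simp [hy]))]
      have hmv : ∀ c, c ∈ xs ++ PySem.List.insertBy g x acc → c ∈ (x :: xs) ++ acc := by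
        intro c hc
        rcases List.mem_append.1 hc with h' | h'
        · simp [h']
        · rcases (PySem.List.mem_insertBy g x c acc).1 h' with h'' | h'' <;> simp [h'']
      exact ih (PySem.List.insertBy g x acc) (fun a ha b hb => h a (hmv a ha) b (hmv b hb))

-- a reverse tuple-key sort of pairs with pairwise-distinct first components is the
-- reverse sort by the first component
theorem sorted2_fst_eq_sorted {κ : Type} [LinearOrder κ] (xs : List (κ × Int))
    (hnd : (xs.map Prod.fst).Nodup) :
    PySem.List.sorted2 xs (fun p => p.1) (fun p => p.2) true
      = PySem.List.sorted xs (fun p => p.1) true := by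
  simp only [PySem.List.sorted2, PySem.List.sorted]
  apply foldl_insertBy_congr
  intro a ha b hb
  simp only [List.append_nil] at ha hb
  by_cases hab : a.1 = b.1
  · have : a = b := by
      by_contra hne
      exact (List.inj_on_of_nodup_map hnd) ha hb hab |> hne
    subst this
    simp
  · rcases lt_or_gt_of_ne hab with h | h
    · simp [h, not_lt.2 (le_of_lt h)]
    · simp [h, not_lt.2 (le_of_lt h)]

-- the canonical sorted histogram A computes
theorem sorted2_counter_eq (L : List Int) :
    PySem.List.sorted2 (PySem.Dict.counter L).items (fun p => p.1) (fun p => p.2) true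
      = (PySem.List.sorted (PySem.Set.ofList L) (fun k => k) true).map
          (fun k => (k, (L.count k : Int))) := by
  have hkeys : ((PySem.Dict.counter L).items.map Prod.fst).Nodup := by
    have := PySem.Dict.nodup_keys_counter L
    simpa [PySem.Dict.keys] using this
  rw [sorted2_fst_eq_sorted _ hkeys]
  apply PySem.List.sorted_rev_eq_of_perm_of_pairwise_gt
  · rw [PySem.Dict.items_counter]
    exact List.Perm.map _ (PySem.List.sorted_perm (PySem.Set.ofList L) (fun k => k) true)
  · have hpw : (PySem.List.sorted (PySem.Set.ofList L) (fun k => k) true).Pairwise (fun a b => b ≤ a) :=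
      PySem.List.sorted_pairwise_rev (PySem.Set.ofList L) (fun k => k)
    have hnd : (PySem.List.sorted (PySem.Set.ofList L) (fun k => k) true).Nodup := by
      have hperm := PySem.List.sorted_perm (PySem.Set.ofList L) (fun k => k) true
      exact hperm.nodup_iff.2 (PySem.Set.nodup_ofList L)
    have : (PySem.List.sorted (PySem.Set.ofList L) (fun k => k) true).Pairwise (fun a b => b < a) := by
      have := hpw.and hnd
      exact this.imp (fun h => lt_of_le_of_ne h.1 (Ne.symm h.2))
    simpa [List.pairwise_map] using List.Pairwise.map _ (fun a b h => h) this

-- Σ_{k ∈ set(L)} k * count(k, L) = Σ L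
theorem sum_ofList_mul_count (L : List Int) :
    ((PySem.Set.ofList L).map (fun k => k * (L.count k : Int))).sum = L.sum := by
  rw [← List.sum_toFinset _ (PySem.Set.nodup_ofList L)]
  have hfs : (PySem.Set.ofList L).toFinset = L.toFinset := by
    ext a; simp [List.mem_toFinset, PySem.Set.mem_ofList]
  rw [hfs]
  calc ∑ a ∈ L.toFinset, a * (L.count a : Int)
      = ∑ a ∈ L.toFinset, (L.count a) • a := by
        refine Finset.sum_congr rfl (fun a _ => ?_)
        simp [mul_comm]
    _ = L.sum := (Finset.sum_list_count L).symm

-- sizes computed from items vs. from values are the same list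
theorem lens_eq (d : List (String × List Int)) :
    pvLensA d = ((PySem.Dict.ofList d).values).map (fun v => (v.length : Int)) := by
  simp [pvLensA, PySem.Dict.values, List.map_map, Function.comp]

-- dedup-first keeps a subsequence of the original list
theorem ofList_sublist (L : List Int) :
    List.Sublist (PySem.Set.ofList L) L := by
  induction L using List.reverseRecOn with
  | nil => simp [PySem.Set.ofList]
  | append_singleton xs x ih =>
      rw [PySem.Set.ofList_append_singleton]
      unfold PySem.Set.add
      split
      · exact ih.trans (List.sublist_append_left xs [x])
      · exact List.Sublist.append ih (List.Sublist.refl [x])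

theorem discard_eq_filter (s : List Int) (x : Int) :
    PySem.Set.discard s x = s.filter (fun y => y ≠ x) := by
  unfold PySem.Set.discard
  apply List.filter_congr
  intro y _
  simp [beq_eq_decide]

theorem ofList_filter (p : Int → Bool) (L : List Int) :
    PySem.Set.ofList (L.filter p) = (PySem.Set.ofList L).filter p := by
  induction L using List.reverseRecOn with
  | nil => simp [PySem.Set.ofList]
  | append_singleton xs x ih =>
      rw [List.filter_append, PySem.Set.ofList_append_singleton, List.filter_singleton]
      by_cases hp : p x = true
      · simp only [hp, cond_true]
        rw [PySem.Set.ofList_append_singleton, ih]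
        unfold PySem.Set.add
        have hc : PySem.Set.contains ((PySem.Set.ofList xs).filter p) x
            = PySem.Set.contains (PySem.Set.ofList xs) x := by
          rw [PySem.Set.contains_eq_listContains, PySem.Set.contains_eq_listContains]
          by_cases hx : x ∈ PySem.Set.ofList xs
          · simp [List.mem_filter, hx, hp]
          · simp [List.mem_filter, hx]
        rw [hc]
        split
        · rfl
        · rw [List.filter_append, List.filter_singleton]
          simp [hp]
      · simp only [hp, cond_false, List.append_nil, ih]
        unfold PySem.Set.add
        split
        · rfl
        · rw [List.filter_append, List.filter_singleton]
          simp [hp]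

theorem ofList_cons_filter (x : Int) (xs : List Int) :
    PySem.Set.ofList (x :: xs)
      = x :: PySem.Set.ofList (xs.filter (fun y => y ≠ x)) := by
  rw [PySem.Set.ofList_cons, discard_eq_filter, ← ofList_filter]

theorem pvRleGo_eq (run : Int) (rest : List Int)
    (h : (run :: rest).Pairwise (fun a b => b ≤ a)) (cnt : Int) :
    pvRleGo run cnt rest
      = (run, cnt + (rest.count run : Int)) :: pvRle (rest.filter (fun y => y ≠ run)) := by
  induction rest generalizing cnt with
  | nil => simp [pvRleGo, pvRle]
  | cons s r ih =>
      rw [pvRleGo]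
      by_cases hs : s = run
      · subst hs
        have h' : (s :: r).Pairwise (fun a b => b ≤ a) := h.sublist (by simp)
        rw [if_pos rfl, ih h']
        have : ((s :: r).count s : Int) = (r.count s : Int) + 1 := by
          simp
        rw [this]
        have hf : (s :: r).filter (fun y => y ≠ s) = r.filter (fun y => y ≠ s) := by
          simp
        rw [hf]
        congr 1
        ring_nf
      · rw [if_neg hs]
        have hlt : ∀ y ∈ s :: r, y < run := by
          intro y hy
          have hle : y ≤ s ∨ y = s := by
            rcases hy with _ | hy
            · right; rfl
            · left; exact ((List.pairwise_cons.1 (h.sublist (List.sublist_cons_self _ _))).1 y (by assumption))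
          have hsr : s ≤ run := (List.pairwise_cons.1 h).1 s (by simp)
          have hslt : s < run := lt_of_le_of_ne hsr hs
          rcases hle with h' | h'
          · exact lt_of_le_of_lt h' hslt
          · exact h' ▸ hslt
        have hc : (s :: r).count run = 0 := by
          rw [List.count_eq_zero]
          intro hmem
          exact absurd rfl (ne_of_lt (hlt run hmem))
        have hf : (s :: r).filter (fun y => y ≠ run) = s :: r := by
          apply List.filter_eq_self.2
          intro b hb
          simp [ne_of_lt (hlt b hb)]
        rw [hc, hf]
        simp [pvRle]

theorem pvRle_eq (L : List Int) (h : L.Pairwise (fun a b => b ≤ a)) :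
    pvRle L = (PySem.Set.ofList L).map (fun k => (k, (L.count k : Int))) := by
  induction hn : L.length using Nat.strong_induction_on generalizing L with
  | _ n ih =>
    match L, h with
    | [], _ => simp [pvRle, PySem.Set.ofList]
    | x :: xs, h =>
      rw [pvRle, pvRleGo_eq x xs h 1, ofList_cons_filter]
      have hlen : (xs.filter (fun y => y ≠ x)).length < n := by
        have h1 : (xs.filter (fun y => y ≠ x)).length ≤ xs.length := List.length_filter_le _ _
        have h2 : xs.length + 1 = n := by simpa using hn
        omega
      have hsd : (xs.filter (fun y => y ≠ x)).Pairwise (fun a b => b ≤ a) :=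
        (List.pairwise_cons.1 h).2.filter _
      rw [ih _ hlen _ hsd rfl]
      rw [List.map_cons]
      congr 1
      · simp; omega
      · apply List.map_congr_left
        intro k hk
        have hkx : k ≠ x := by
          have := (PySem.Set.mem_ofList (xs.filter (fun y => y ≠ x)) k).1 hk
          simp [List.mem_filter] at this
          exact this.2
        have hcf : List.count k (List.filter (fun y => !decide (y = x)) xs) = List.count k xs := by
          rw [List.count_filter]
          simp [hkx]
        have hxk : ¬ (x = k) := fun hh => hkx hh.symm
        simp [hxk, hcf]


-- A's total (over the sorted histogram) equals B's total (over the cluster sizes)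
theorem total_eq (L : List Int) :
    (((PySem.List.sorted (PySem.Set.ofList L) (fun k => k) true).map
        (fun k => (k, (L.count k : Int)))).map (fun p => p.1 * p.2)).sum = L.sum := by
  rw [List.map_map]
  have hperm : ((PySem.List.sorted (PySem.Set.ofList L) (fun k => k) true).map
      ((fun p => p.1 * p.2) ∘ (fun k => (k, (L.count k : Int))))).Perm
      ((PySem.Set.ofList L).map (fun k => k * (L.count k : Int))) :=
    List.Perm.map _ (PySem.List.sorted_perm (PySem.Set.ofList L) (fun k => k) true)
  rw [hperm.sum_eq, sum_ofList_mul_count]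

-- B's histogram equals the canonical sorted histogram A computes on the same sizes list
theorem pvSizeDist_eq (d : List (String × List Int)) :
    pvSizeDist d
      = (PySem.List.sorted (PySem.Set.ofList (pvLensA d)) (fun k => k) true).map
          (fun k => (k, ((pvLensA d).count k : Int))) := by
  have hSD : pvSizeDist d
      = pvRle (PySem.List.sorted (pvLensA d) (fun k => k) true) := by
    rw [lens_eq]
    unfold pvSizeDist pvRle
    rfl
  set L := pvLensA d with hL
  set S := PySem.List.sorted L (fun k => k) true with hS
  have hsdS : S.Pairwise (fun a b => b ≤ a) := PySem.List.sorted_pairwise_rev L (fun k => k)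
  have hcount : ∀ k : Int, S.count k = L.count k := fun k =>
    (PySem.List.sorted_perm L (fun k => k) true).count_eq k
  have hsets : PySem.List.sorted (PySem.Set.ofList L) (fun k => k) true
      = PySem.Set.ofList S := by
    apply PySem.List.sorted_rev_eq_of_perm_of_pairwise_gt
    · apply (List.perm_ext_iff_of_nodup (PySem.Set.nodup_ofList S) (PySem.Set.nodup_ofList L)).2
      intro a
      rw [PySem.Set.mem_ofList, PySem.Set.mem_ofList]
      exact (PySem.List.sorted_perm L (fun k => k) true).mem_iff
    · have hpw : (PySem.Set.ofList S).Pairwise (fun a b => b ≤ a) :=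
        hsdS.sublist (ofList_sublist S)
      have : (PySem.Set.ofList S).Pairwise (fun a b => b < a) := by
        have := hpw.and (PySem.Set.nodup_ofList S)
        exact this.imp (fun h => lt_of_le_of_ne h.1 (Ne.symm h.2))
      simpa [List.pairwise_map] using List.Pairwise.map _ (fun a b h => h) this
  rw [hSD, pvRle_eq S hsdS, hsets]
  exact List.map_congr_left (fun k _ => by rw [hcount k])

-- ===== VERDICT (by name: the statement is the Claim_ definition above) =====
theorem report_alchemize_clusters_spec : Claim_equal_report_alchemize_clusters := by
  intro ac outs _
  unfold Spec_report_alchemize_clusters report_alchemize_clusters report_alchemize_clusters_alt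
  refine Prod.ext ?_ (Prod.ext ?_ ?_) <;> simp only
  · rw [sorted2_counter_eq, pvSizeDist_eq]
  · rw [sorted2_counter_eq, pvSizeDist_eq]
  · rw [sorted2_counter_eq, total_eq, lens_eq]
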